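-- pv_equiv track=rewrite | github.com/rizeamihai1/Computer-Vision-Suite | Qwirkle Project/bonus.py | calculeaza_scor_qwirkle
-- ===== SOURCE A (Python) =====
-- def calculeaza_scor_qwirkle(new_pieces_data, board_state):
--     total_score = 0
--     counted_lines_h = set()
--     counted_lines_v = set()
--
--     for (nx, ny) in new_pieces_data:
--         min_x, max_x = nx, nx
--         while (min_x - 1, ny) in board_state: min_x -= 1
--         while (max_x + 1, ny) in board_state: max_x += 1
--
--         line_len_h = max_x - min_x + 1
--         line_id_h = (ny, min_x, max_x)
--
--         if line_len_h > 1 and line_id_h not in counted_lines_h: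
--             pts = line_len_h
--             if line_len_h == 6: pts += 6
--             total_score += pts
--             counted_lines_h.add(line_id_h)
--
--         min_y, max_y = ny, ny
--         while (nx, min_y - 1) in board_state: min_y -= 1
--         while (nx, max_y + 1) in board_state: max_y += 1
--
--         line_len_v = max_y - min_y + 1
--         line_id_v = (nx, min_y, max_y)
--
--         if line_len_v > 1 and line_id_v not in counted_lines_v:
--             pts = line_len_v
--             if line_len_v == 6: pts += 6
--             total_score += pts
--             counted_lines_v.add(line_id_v)
--
--     return total_score
-- ===== SOURCE B (Python) =====
-- def calculeaza_scor_qwirkle(new_pieces_data, board_state):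
--     # Index the board once: group cells by row and by column, then precompute every
--     # maximal consecutive run per group (sort-then-scan).  Each piece's line is then
--     # two dictionary lookups (run left of it / run right of it) instead of a cell-by-cell walk.
--     rows = {}
--     cols = {}
--     for (x, y) in board_state:
--         rows.setdefault(y, set()).add(x)
--         cols.setdefault(x, set()).add(y)
--
--     def run_map(groups):
--         # (k, c) -> (a, b): the maximal consecutive run [a, b] in group k containing c
--         idx = {}
--         for k, cells in groups.items():
--             vs = sorted(cells)
--             while vs:
--                 a = b = vs[0]
--                 vs = vs[1:]
--                 while vs and vs[0] == b + 1:
--                     b = vs[0]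
--                     vs = vs[1:]
--                 for c in range(a, b + 1):
--                     idx[(k, c)] = (a, b)
--         return idx
--
--     hrun = run_map(rows)
--     vrun = run_map(cols)
--
--     h_lines = set()
--     v_lines = set()
--     for (nx, ny) in new_pieces_data:
--         h_lines.add((ny, hrun.get((ny, nx - 1), (nx, nx))[0], hrun.get((ny, nx + 1), (nx, nx))[1]))
--         v_lines.add((nx, vrun.get((nx, ny - 1), (ny, ny))[0], vrun.get((nx, ny + 1), (ny, ny))[1]))
--
--     def pts(line):
--         n = line[2] - line[1] + 1
--         if n <= 1:
--             return 0
--         return n + 6 if n == 6 else n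
--
--     return sum(map(pts, h_lines)) + sum(map(pts, v_lines))
-- ===== Notes on version B (the rewrite author's own statement) =====
-- stated objective: alternative
-- what changed: B eliminates A's per-piece cell-by-cell extent walks (list membership per step): it groups board cells by row and by column, sorts each group once and scans it into a precomputed map from cell to its maximal consecutive run, so each piece's line becomes two dictionary lookups; unique lines are collected into sets and summed afterwards.
import Mathlib
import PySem

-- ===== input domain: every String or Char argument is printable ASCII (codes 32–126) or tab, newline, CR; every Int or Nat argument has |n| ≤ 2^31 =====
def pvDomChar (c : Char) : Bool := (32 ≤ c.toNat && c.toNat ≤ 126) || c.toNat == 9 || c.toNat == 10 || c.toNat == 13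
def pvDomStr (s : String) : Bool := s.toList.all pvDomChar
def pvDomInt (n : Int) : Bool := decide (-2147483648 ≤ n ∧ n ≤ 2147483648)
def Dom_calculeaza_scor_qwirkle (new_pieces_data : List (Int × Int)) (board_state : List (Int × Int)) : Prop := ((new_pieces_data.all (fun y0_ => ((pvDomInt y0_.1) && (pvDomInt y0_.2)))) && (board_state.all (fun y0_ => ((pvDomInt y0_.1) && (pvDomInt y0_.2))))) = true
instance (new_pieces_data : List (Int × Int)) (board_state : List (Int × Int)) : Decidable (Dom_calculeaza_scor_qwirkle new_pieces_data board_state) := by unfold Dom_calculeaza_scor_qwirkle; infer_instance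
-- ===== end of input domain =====

-- B replaces A's per-piece cell-by-cell extent walks by a precomputed run index:
-- group the board by row/column, sort each group, scan it into a map cell ↦ its maximal
-- consecutive run, and read each piece's line off two dictionary lookups; unique lines are
-- collected into sets and summed afterwards.

-- ===== PORT A =====
-- A's `while (min_x-1, ny) in board_state: min_x -= 1` walk, as fuel recursion; fuel =
-- board_state.length always suffices: every successful step finds a DISTINCT board cell.
def pvWalkDn (board : List (Int × Int)) (cell : Int → Int × Int) : Nat → Int → Int
  | 0, x => x
  | fuel+1, x => if cell (x - 1) ∈ board then pvWalkDn board cell fuel (x - 1) else x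

def pvWalkUp (board : List (Int × Int)) (cell : Int → Int × Int) : Nat → Int → Int
  | 0, x => x
  | fuel+1, x => if cell (x + 1) ∈ board then pvWalkUp board cell fuel (x + 1) else x

-- the body of A's `for (nx, ny) in new_pieces_data` loop, on state (total_score, counted_lines_h, counted_lines_v)
def pvStepA (bs : List (Int × Int))
    (st : Int × PySem.Set (Int × Int × Int) × PySem.Set (Int × Int × Int)) (p : Int × Int) :
    Int × PySem.Set (Int × Int × Int) × PySem.Set (Int × Int × Int) :=
  let min_x := pvWalkDn bs (fun x => (x, p.2)) bs.length p.1
  let max_x := pvWalkUp bs (fun x => (x, p.2)) bs.length p.1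
  let llh := max_x - min_x + 1
  let idh := (p.2, min_x, max_x)
  let st1 : Int × PySem.Set (Int × Int × Int) :=
    if 1 < llh ∧ idh ∉ st.2.1 then
      (st.1 + (if llh = 6 then llh + 6 else llh), PySem.Set.add st.2.1 idh)
    else (st.1, st.2.1)
  let min_y := pvWalkDn bs (fun y => (p.1, y)) bs.length p.2
  let max_y := pvWalkUp bs (fun y => (p.1, y)) bs.length p.2
  let llv := max_y - min_y + 1
  let idv := (p.1, min_y, max_y)
  let st2 : Int × PySem.Set (Int × Int × Int) :=
    if 1 < llv ∧ idv ∉ st.2.2 then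
      (st1.1 + (if llv = 6 then llv + 6 else llv), PySem.Set.add st.2.2 idv)
    else (st1.1, st.2.2)
  (st2.1, st1.2, st2.2)

def calculeaza_scor_qwirkle (new_pieces_data : List (Int × Int)) (board_state : List (Int × Int)) : Int :=
  (new_pieces_data.foldl (pvStepA board_state) (0, PySem.Set.empty, PySem.Set.empty)).1

-- ===== PORT B =====
-- Source B's inner `while vs and vs[0] == b + 1: …` : consume the consecutive prefix after b
def pvTakeRun (b : Int) : List Int → Int × List Int
  | [] => (b, [])
  | v :: rest => if v = b + 1 then pvTakeRun v rest else (b, v :: rest)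

theorem pvTakeRun_len (b : Int) (l : List Int) : (pvTakeRun b l).2.length ≤ l.length := by
  induction l generalizing b with
  | nil => simp [pvTakeRun]
  | cons v rest ih =>
    simp only [pvTakeRun]
    split
    · exact le_trans (ih v) (Nat.le_succ _)
    · simp

-- Source B's outer `while vs:` loop of run_map: emit each run's entries into idx
def pvEmitRuns (k : Int) (idx : PySem.Dict (Int × Int) (Int × Int)) : List Int → PySem.Dict (Int × Int) (Int × Int)
  | [] => idx
  | a :: rest =>
    let r := pvTakeRun a rest
    pvEmitRuns k ((PySem.List.pyRange a (r.1 + 1) 1).foldl (fun d c => d.insert (k, c) (a, r.1)) idx) r.2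
  termination_by l => l.length
  decreasing_by exact Nat.lt_succ_of_le (pvTakeRun_len a rest)

-- Source B's run_map
def pvRunMap (groups : PySem.Dict Int (PySem.Set Int)) : PySem.Dict (Int × Int) (Int × Int) :=
  groups.items.foldl (fun idx kv => pvEmitRuns kv.1 idx (PySem.List.sorted kv.2 (fun x => x) false)) PySem.Dict.empty

-- Source B's pts(line)
def pvPts (line : Int × Int × Int) : Int :=
  let n := line.2.2 - line.2.1 + 1
  if n ≤ 1 then 0 else if n = 6 then n + 6 else n

def calculeaza_scor_qwirkle_alt (new_pieces_data : List (Int × Int)) (board_state : List (Int × Int)) : Int :=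
  let rows := board_state.foldl (fun d p => d.insert p.2 (PySem.Set.add (d.getD p.2 PySem.Set.empty) p.1)) PySem.Dict.empty
  let cols := board_state.foldl (fun d p => d.insert p.1 (PySem.Set.add (d.getD p.1 PySem.Set.empty) p.2)) PySem.Dict.empty
  let hrun := pvRunMap rows
  let vrun := pvRunMap cols
  let s := new_pieces_data.foldl (fun s p =>
      (PySem.Set.add s.1 (p.2, (hrun.getD (p.2, p.1 - 1) (p.1, p.1)).1, (hrun.getD (p.2, p.1 + 1) (p.1, p.1)).2),
       PySem.Set.add s.2 (p.1, (vrun.getD (p.1, p.2 - 1) (p.2, p.2)).1, (vrun.getD (p.1, p.2 + 1) (p.2, p.2)).2)))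
    (PySem.Set.empty, PySem.Set.empty)
  (s.1.map pvPts).sum + (s.2.map pvPts).sum

-- ===== PRECONDITION & SPEC =====
def Spec_calculeaza_scor_qwirkle (new_pieces_data : List (Int × Int)) (board_state : List (Int × Int)) (out : Int) : Prop := out = calculeaza_scor_qwirkle_alt new_pieces_data board_state
instance (new_pieces_data : List (Int × Int)) (board_state : List (Int × Int)) (out : Int) : Decidable (Spec_calculeaza_scor_qwirkle new_pieces_data board_state out) := by unfold Spec_calculeaza_scor_qwirkle; infer_instance

-- ===== CLAIM (what is proved, stated in full; the proofs are below) =====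
def Claim_equal_calculeaza_scor_qwirkle : Prop := ∀ (new_pieces_data : List (Int × Int)) (board_state : List (Int × Int)), Dom_calculeaza_scor_qwirkle new_pieces_data board_state → Spec_calculeaza_scor_qwirkle new_pieces_data board_state (calculeaza_scor_qwirkle new_pieces_data board_state)

-- ===== LEMMAS AND PROOFS =====

-- a maximal consecutive run of the coordinate list S
def pvIsRun (S : List Int) (a b : Int) : Prop :=
  a ≤ b ∧ (∀ t, a ≤ t → t ≤ b → t ∈ S) ∧ (a - 1) ∉ S ∧ (b + 1) ∉ S

-- ---- walk characterisation ----
theorem pvWalkDn_stop (bs : List (Int × Int)) (cell : Int → Int × Int) (fuel : Nat) (x : Int)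
    (h : cell (x - 1) ∉ bs) : pvWalkDn bs cell fuel x = x := by
  cases fuel with
  | zero => rfl
  | succ f => simp [pvWalkDn, h]

theorem pvWalkUp_stop (bs : List (Int × Int)) (cell : Int → Int × Int) (fuel : Nat) (x : Int)
    (h : cell (x + 1) ∉ bs) : pvWalkUp bs cell fuel x = x := by
  cases fuel with
  | zero => rfl
  | succ f => simp [pvWalkUp, h]

theorem pvWalkDn_eq (bs : List (Int × Int)) (cell : Int → Int × Int) (a : Int) :
    ∀ (fuel : Nat) (x : Int), a ≤ x → (x - a).toNat ≤ fuel →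
    (∀ t, a ≤ t → t < x → cell t ∈ bs) → cell (a - 1) ∉ bs →
    pvWalkDn bs cell fuel x = a := by
  intro fuel
  induction fuel with
  | zero =>
    intro x hax hf _ _
    have hxa : x = a := by omega
    subst hxa
    rfl
  | succ f ih =>
    intro x hax hf h1 h2
    by_cases hx : x = a
    · subst hx; simp [pvWalkDn, h2]
    · have hlt : a < x := lt_of_le_of_ne hax (Ne.symm hx)
      have hmem : cell (x - 1) ∈ bs := h1 _ (by omega) (by omega)
      simp only [pvWalkDn, if_pos hmem]
      exact ih (x - 1) (by omega) (by omega) (fun t ht1 ht2 => h1 t ht1 (by omega)) h2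

theorem pvWalkUp_eq (bs : List (Int × Int)) (cell : Int → Int × Int) (b : Int) :
    ∀ (fuel : Nat) (x : Int), x ≤ b → (b - x).toNat ≤ fuel →
    (∀ t, x < t → t ≤ b → cell t ∈ bs) → cell (b + 1) ∉ bs →
    pvWalkUp bs cell fuel x = b := by
  intro fuel
  induction fuel with
  | zero =>
    intro x hax hf _ _
    have hxb : x = b := by omega
    subst hxb
    rfl
  | succ f ih =>
    intro x hax hf h1 h2
    by_cases hx : x = b
    · subst hx; simp [pvWalkUp, h2]
    · have hlt : x < b := lt_of_le_of_ne hax hx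
      have hmem : cell (x + 1) ∈ bs := h1 _ (by omega) (by omega)
      simp only [pvWalkUp, if_pos hmem]
      exact ih (x + 1) (by omega) (by omega) (fun t ht1 ht2 => h1 t (by omega) ht2) h2

-- fuel sufficiency: the covered cells are distinct members of bs
theorem pv_card_bound (bs : List (Int × Int)) (cell : Int → Int × Int)
    (hinj : Function.Injective cell) (a x : Int)
    (h1 : ∀ t, a ≤ t → t < x → cell t ∈ bs) : (x - a).toNat ≤ bs.length := by
  by_cases hax : a ≤ x
  case neg => omega
  set n := (x - a).toNat with hn
  set L := (List.range n).map (fun i : Nat => cell (a + (i : Int))) with hLd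
  have hL : L.Nodup := by
    refine List.Nodup.map ?_ List.nodup_range
    intro i j hij
    have : a + (i : Int) = a + (j : Int) := hinj hij
    omega
  have hsub : L ⊆ bs := by
    intro z hz
    simp only [hLd, List.mem_map, List.mem_range] at hz
    obtain ⟨i, hi, rfl⟩ := hz
    exact h1 _ (by omega) (by omega)
  have h2 : L.toFinset.card = n := by
    rw [List.toFinset_card_of_nodup hL]; simp [hLd]
  have h3 : L.toFinset ⊆ bs.toFinset := by
    intro z hz; rw [List.mem_toFinset] at *; exact hsub hz
  have := Finset.card_le_card h3
  have := bs.toFinset_card_le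
  omega

-- ---- grouping dict ----
theorem pv_group_mem (key val : Int × Int → Int) (l : List (Int × Int)) :
    ∀ (d : PySem.Dict Int (PySem.Set Int)) (y x : Int),
    (x ∈ (l.foldl (fun d p => d.insert (key p) (PySem.Set.add (d.getD (key p) PySem.Set.empty) (val p))) d).getD y PySem.Set.empty
      ↔ x ∈ d.getD y PySem.Set.empty ∨ ∃ p ∈ l, key p = y ∧ val p = x) := by
  induction l with
  | nil => simp
  | cons p l ih =>
    intro d y x
    simp only [List.foldl_cons]
    rw [ih, PySem.Dict.getD_insert]
    by_cases hy : y = key p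
    · subst hy
      rw [if_pos rfl, PySem.Set.mem_add]
      simp only [List.mem_cons]
      constructor
      · rintro (⟨h | rfl⟩ | ⟨q, hq, h1, h2⟩)
        · exact Or.inl h
        · exact Or.inr ⟨p, Or.inl rfl, rfl, rfl⟩
        · exact Or.inr ⟨q, Or.inr hq, h1, h2⟩
      · rintro (h | ⟨q, (rfl | hq), h1, h2⟩)
        · exact Or.inl (Or.inl h)
        · exact Or.inl (Or.inr h2.symm)
        · exact Or.inr ⟨q, hq, h1, h2⟩
    · rw [if_neg hy]
      simp only [List.mem_cons]
      constructor
      · rintro (h | ⟨q, hq, h1, h2⟩)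
        · exact Or.inl h
        · exact Or.inr ⟨q, Or.inr hq, h1, h2⟩
      · rintro (h | ⟨q, (rfl | hq), h1, h2⟩)
        · exact Or.inl h
        · exact absurd h1 (fun h => hy h.symm)
        · exact Or.inr ⟨q, hq, h1, h2⟩

theorem pv_group_nodup (key val : Int × Int → Int) (l : List (Int × Int)) :
    ∀ (d : PySem.Dict Int (PySem.Set Int)),
    (∀ y, (d.getD y PySem.Set.empty).Nodup) →
    ∀ y, ((l.foldl (fun d p => d.insert (key p) (PySem.Set.add (d.getD (key p) PySem.Set.empty) (val p))) d).getD y PySem.Set.empty).Nodup := by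
  induction l with
  | nil => intro d hd y; exact hd y
  | cons p l ih =>
    intro d hd y
    simp only [List.foldl_cons]
    refine ih _ ?_ y
    intro z
    rw [PySem.Dict.getD_insert]
    split
    · exact PySem.Set.nodup_add _ _ (hd _)
    · exact hd z

-- ---- takeRun characterisation ----
theorem pvTakeRun_spec : ∀ (l : List Int) (a : Int), (a :: l).Pairwise (· < ·) →
    a ≤ (pvTakeRun a l).1
    ∧ (∀ t, a ≤ t → t ≤ (pvTakeRun a l).1 → t ∈ a :: l)
    ∧ (∀ v ∈ (pvTakeRun a l).2, (pvTakeRun a l).1 + 2 ≤ v)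
    ∧ (∀ v ∈ a :: l, (a ≤ v ∧ v ≤ (pvTakeRun a l).1) ∨ v ∈ (pvTakeRun a l).2)
    ∧ (pvTakeRun a l).2.Pairwise (· < ·)
    ∧ (pvTakeRun a l).2 ⊆ l := by
  intro l
  induction l with
  | nil =>
    intro a _
    refine ⟨le_refl _, ?_, by simp [pvTakeRun], ?_, by simp [pvTakeRun], by simp [pvTakeRun]⟩
    · intro t h1 h2
      simp only [pvTakeRun] at h1 h2 ⊢
      have : t = a := le_antisymm h2 h1
      simp [this]
    · intro v hv
      simp only [pvTakeRun]
      left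
      simp at hv
      omega
  | cons v rest ih =>
    intro a h
    have hav : a < v := (List.pairwise_cons.mp h).1 v (List.mem_cons_self ..)
    have htail : (v :: rest).Pairwise (· < ·) := (List.pairwise_cons.mp h).2
    by_cases hv : v = a + 1
    · subst hv
      obtain ⟨t1, t2, t3, t4, t5, t6⟩ := ih (a + 1) htail
      have heq : pvTakeRun a ((a + 1) :: rest) = pvTakeRun (a + 1) rest := by
        simp [pvTakeRun]
      rw [heq]
      refine ⟨by omega, ?_, t3, ?_, t5, fun z hz => List.mem_cons_of_mem _ (t6 hz)⟩
      · intro t ht1 ht2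
        by_cases hta : t = a
        · simp [hta]
        · exact List.mem_cons_of_mem _ (t2 t (by omega) ht2)
      · intro w hw
        rcases List.mem_cons.mp hw with rfl | hw'
        · exact Or.inl ⟨le_refl _, by omega⟩
        · rcases t4 w hw' with ⟨h1, h2⟩ | h2
          · exact Or.inl ⟨by omega, h2⟩
          · exact Or.inr h2
    · have heq : pvTakeRun a (v :: rest) = (a, v :: rest) := by
        simp [pvTakeRun, hv]
      rw [heq]
      refine ⟨le_refl _, ?_, ?_, ?_, htail, fun z hz => hz⟩
      · intro t h1 h2
        have : t = a := le_antisymm h2 h1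
        simp [this]
      · intro w hw
        rcases List.mem_cons.mp hw with rfl | hw'
        · omega
        · have := (List.pairwise_cons.mp htail).1 w hw'
          omega
      · intro w hw
        rcases List.mem_cons.mp hw with rfl | hw'
        · exact Or.inl ⟨le_refl _, le_refl _⟩
        · exact Or.inr hw'

-- ---- emitRuns lookups ----
theorem pv_foldl_insert_get_ne (k : Int) (v : Int × Int) (l : List Int) :
    ∀ (d : PySem.Dict (Int × Int) (Int × Int)) (q : Int × Int), (∀ c ∈ l, q ≠ (k, c)) →
    (l.foldl (fun d c => d.insert (k, c) v) d).get? q = d.get? q := by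
  induction l with
  | nil => intro d q _; rfl
  | cons c l ih =>
    intro d q hq
    simp only [List.foldl_cons]
    rw [ih _ _ (fun c' hc' => hq c' (List.mem_cons_of_mem _ hc')),
      PySem.Dict.get?_insert_of_ne _ _ (hq c (List.mem_cons_self ..))]

theorem pv_foldl_insert_get_mem (k : Int) (v : Int × Int) (l : List Int) :
    ∀ (d : PySem.Dict (Int × Int) (Int × Int)) (c : Int), c ∈ l →
    (l.foldl (fun d c => d.insert (k, c) v) d).get? (k, c) = some v := by
  induction l with
  | nil => intro d c h; simp at h
  | cons c0 l ih =>
    intro d c hc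
    simp only [List.foldl_cons]
    by_cases hmem : c ∈ l
    · exact ih _ _ hmem
    · have hc0 : c = c0 := (List.mem_cons.mp hc).resolve_right hmem
      subst hc0
      rw [pv_foldl_insert_get_ne k v l _ _ (fun c' hc' => by
        intro h; exact hmem (by cases h; exact hc'))]
      exact PySem.Dict.get?_insert_self _ _ _

theorem pvEmitRuns_get_ne (k : Int) (vs : List Int) (idx : PySem.Dict (Int × Int) (Int × Int)) (q : Int × Int) (h : q.1 ≠ k) :
    (pvEmitRuns k idx vs).get? q = idx.get? q := by
  induction idx, vs using pvEmitRuns.induct k with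
  | case1 idx => rw [pvEmitRuns]
  | case2 idx a rest r ih =>
    rw [pvEmitRuns]
    rw [ih]
    exact pv_foldl_insert_get_ne k _ _ _ _ (fun c _ => by
      intro he; exact h (by rw [he]))

theorem pvEmitRuns_get_notmem (k : Int) :
    ∀ (vs : List Int) (idx : PySem.Dict (Int × Int) (Int × Int)), ∀ (c : Int),
    vs.Pairwise (· < ·) → c ∉ vs →
    (pvEmitRuns k idx vs).get? (k, c) = idx.get? (k, c) := by
  intro vs idx
  induction idx, vs using pvEmitRuns.induct k with
  | case1 idx => intro c _ _; rw [pvEmitRuns]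
  | case2 idx a rest r ih =>
    intro c hp hc
    obtain ⟨t1, t2, t3, t4, t5, t6⟩ := pvTakeRun_spec rest a hp
    rw [show pvTakeRun a rest = r from rfl] at t1 t2 t3 t4 t5 t6
    rw [pvEmitRuns]
    rw [ih c t5 (fun h => hc (List.mem_cons_of_mem _ (t6 h)))]
    refine pv_foldl_insert_get_ne k _ _ _ _ ?_
    intro c' hc'
    have : c' ∈ a :: rest := t2 c' (by
      have := PySem.List.mem_pyRange_one.mp hc'
      omega) (by
      have := PySem.List.mem_pyRange_one.mp hc'
      omega)
    intro he
    apply hc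
    have : c = c' := by cases he; rfl
    rw [this]
    exact ‹c' ∈ a :: rest›

theorem pvEmitRuns_get_mem (k : Int) :
    ∀ (vs : List Int) (idx : PySem.Dict (Int × Int) (Int × Int)), ∀ (c : Int),
    vs.Pairwise (· < ·) → c ∈ vs →
    ∃ a b, pvIsRun vs a b ∧ a ≤ c ∧ c ≤ b ∧ (pvEmitRuns k idx vs).get? (k, c) = some (a, b) := by
  intro vs idx
  induction idx, vs using pvEmitRuns.induct k with
  | case1 idx => intro c _ h; simp at h
  | case2 idx a rest r ih =>
    intro c hp hc
    obtain ⟨t1, t2, t3, t4, t5, t6⟩ := pvTakeRun_spec rest a hp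
    rw [show pvTakeRun a rest = r from rfl] at t1 t2 t3 t4 t5 t6
    have hmin : ∀ w ∈ rest, a < w := (List.pairwise_cons.mp hp).1
    by_cases hin : a ≤ c ∧ c ≤ r.1
    · refine ⟨a, r.1, ⟨t1, t2, ?_, ?_⟩, hin.1, hin.2, ?_⟩
      · intro h
        rcases List.mem_cons.mp h with h | h
        · omega
        · exact absurd (hmin _ h) (by omega)
      · intro h
        rcases t4 _ h with ⟨h1, h2⟩ | h2
        · omega
        · exact absurd (t3 _ h2) (by omega)
      · rw [pvEmitRuns]
        rw [show pvTakeRun a rest = r from rfl]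
        rw [pvEmitRuns_get_notmem k _ _ c t5 (fun h => by have := t3 _ h; omega)]
        refine pv_foldl_insert_get_mem k _ _ _ _ ?_
        rw [PySem.List.mem_pyRange_one]
        omega
    · have hcr : c ∈ r.2 := by
        rcases t4 _ hc with h | h
        · exact absurd h hin
        · exact h
      obtain ⟨a', b', ⟨u1, u2, u3, u4⟩, u5, u6, u7⟩ := ih c t5 hcr
      have ha' : r.1 + 2 ≤ a' := t3 _ (u2 a' (le_refl _) u1)
      refine ⟨a', b', ⟨u1, ?_, ?_, ?_⟩, u5, u6, ?_⟩
      · intro t h1 h2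
        exact List.mem_cons_of_mem _ (t6 (u2 t h1 h2))
      · intro h
        rcases List.mem_cons.mp h with h | h
        · omega
        · rcases t4 _ (List.mem_cons_of_mem _ h) with ⟨h1, h2⟩ | h2
          · omega
          · exact u3 h2
      · intro h
        rcases List.mem_cons.mp h with h | h
        · omega
        · rcases t4 _ (List.mem_cons_of_mem _ h) with ⟨h1, h2⟩ | h2
          · omega
          · exact u4 h2
      · rw [pvEmitRuns]
        rw [show pvTakeRun a rest = r from rfl]
        exact u7

-- ---- runMap lookups (relative to the group dict) ----
theorem pv_runmap_fold_ne (k c : Int) (l : List (Int × PySem.Set Int)) :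
    ∀ (idx : PySem.Dict (Int × Int) (Int × Int)), k ∉ l.map (·.1) →
    (l.foldl (fun idx kv => pvEmitRuns kv.1 idx (PySem.List.sorted kv.2 (fun x => x) false)) idx).get? (k, c) = idx.get? (k, c) := by
  induction l with
  | nil => intro idx _; rfl
  | cons kv l ih =>
    intro idx hk
    simp only [List.map_cons, List.mem_cons] at hk
    have hk1 : k ≠ kv.1 := fun h => hk (Or.inl h)
    have hk2 : k ∉ l.map (·.1) := fun h => hk (Or.inr h)
    simp only [List.foldl_cons]
    rw [ih _ hk2, pvEmitRuns_get_ne _ _ _ _ hk1]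

theorem pv_sorted_pairwise_lt (cells : PySem.Set Int) (hv : cells.Nodup) :
    (PySem.List.sorted cells (fun x => x) false).Pairwise (· < ·) := by
  have hperm := PySem.List.sorted_perm cells (fun x => x) false
  have hnd : (PySem.List.sorted cells (fun x => x) false).Nodup := hperm.nodup_iff.mpr hv
  have hle := PySem.List.sorted_pairwise cells (fun x => x)
  exact (hle.and hnd).imp (fun h => lt_of_le_of_ne h.1 h.2)

-- the final run-index lookup: none off the group, the enclosing maximal run on it
theorem pvRunMap_cases (groups : PySem.Dict Int (PySem.Set Int)) (k c : Int)
    (hnd : groups.keys.Nodup) (hv : (groups.getD k PySem.Set.empty).Nodup) :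
    (c ∉ groups.getD k PySem.Set.empty → (pvRunMap groups).get? (k, c) = none)
    ∧ (c ∈ groups.getD k PySem.Set.empty →
      ∃ a b, pvIsRun (groups.getD k PySem.Set.empty) a b ∧ a ≤ c ∧ c ≤ b ∧
        (pvRunMap groups).get? (k, c) = some (a, b)) := by
  have hkeys : groups.keys = groups.items.map (·.1) := rfl
  by_cases hk : k ∈ groups.keys
  · have hmem : (k, groups.getD k PySem.Set.empty) ∈ groups.items := by
      rw [PySem.Dict.items_eq_map_keys groups hnd PySem.Set.empty]
      exact List.mem_map.mpr ⟨k, hk, rfl⟩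
    obtain ⟨l1, l2, hsplit⟩ := List.append_of_mem hmem
    have hndm : (groups.items.map (·.1)).Nodup := by rw [← hkeys]; exact hnd
    rw [hsplit] at hndm
    simp only [List.map_append, List.map_cons] at hndm
    obtain ⟨hn1, hn2, hdisj⟩ := List.nodup_append.mp hndm
    have hk2 : k ∉ l2.map (·.1) := (List.nodup_cons.mp hn2).1
    have hk1 : k ∉ l1.map (·.1) := fun h => hdisj k h k List.mem_cons_self rfl
    have hsort := pv_sorted_pairwise_lt _ hv
    have hfold : (pvRunMap groups).get? (k, c)
        = (pvEmitRuns k (l1.foldl (fun idx kv => pvEmitRuns kv.1 idx (PySem.List.sorted kv.2 (fun x => x) false)) PySem.Dict.empty)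
            (PySem.List.sorted (groups.getD k PySem.Set.empty) (fun x => x) false)).get? (k, c) := by
      unfold pvRunMap
      rw [hsplit, List.foldl_append, List.foldl_cons]
      exact pv_runmap_fold_ne k c l2 _ hk2
    constructor
    · intro hc
      rw [hfold,
        pvEmitRuns_get_notmem k _ _ c hsort (fun h => hc ((PySem.List.mem_sorted _ _ _ _).mp h)),
        pv_runmap_fold_ne k c l1 _ hk1]
      rfl
    · intro hc
      obtain ⟨a, b, ⟨u1, u2, u3, u4⟩, u5, u6, u7⟩ :=
        pvEmitRuns_get_mem k (PySem.List.sorted (groups.getD k PySem.Set.empty) (fun x => x) false) _ c hsort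
          ((PySem.List.mem_sorted _ _ _ _).mpr hc)
      refine ⟨a, b, ⟨u1, ?_, ?_, ?_⟩, u5, u6, by rw [hfold]; exact u7⟩
      · intro t h1 h2
        exact (PySem.List.mem_sorted _ _ _ _).mp (u2 t h1 h2)
      · intro h
        exact u3 ((PySem.List.mem_sorted _ _ _ _).mpr h)
      · intro h
        exact u4 ((PySem.List.mem_sorted _ _ _ _).mpr h)
  · have hcont : groups.contains k = false := by
      rcases h : groups.contains k with _ | _
      · rfl
      · exact absurd ((PySem.Dict.contains_iff_mem_keys _ _).mp h) hk
    have hget : groups.getD k PySem.Set.empty = PySem.Set.empty :=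
      PySem.Dict.getD_of_not_contains _ _ hcont
    constructor
    · intro _
      unfold pvRunMap
      rw [pv_runmap_fold_ne k c _ _ (by rw [← hkeys]; exact hk)]
      rfl
    · intro hc
      rw [hget] at hc
      simp [PySem.Set.empty] at hc

-- ---- the two lookups equal A's walks ----
def pvIdH (bs : List (Int × Int)) (p : Int × Int) : Int × Int × Int :=
  (p.2, pvWalkDn bs (fun x => (x, p.2)) bs.length p.1, pvWalkUp bs (fun x => (x, p.2)) bs.length p.1)

def pvIdV (bs : List (Int × Int)) (p : Int × Int) : Int × Int × Int :=
  (p.1, pvWalkDn bs (fun y => (p.1, y)) bs.length p.2, pvWalkUp bs (fun y => (p.1, y)) bs.length p.2)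

def pvStepW (bs : List (Int × Int))
    (s : PySem.Set (Int × Int × Int) × PySem.Set (Int × Int × Int)) (p : Int × Int) :
    PySem.Set (Int × Int × Int) × PySem.Set (Int × Int × Int) :=
  (PySem.Set.add s.1 (pvIdH bs p), PySem.Set.add s.2 (pvIdV bs p))

-- ---- dedup/scoring: A's running total equals B's set points ----
def pvLink (s t : PySem.Set (Int × Int × Int)) : Prop :=
  ∀ id, pvPts id ≠ 0 → (id ∈ s ↔ id ∈ t)

theorem pv_skip {sh hs : PySem.Set (Int × Int × Int)} {c lo hi : Int}
    (link : pvLink sh hs) (hcond : ¬(1 < hi - lo + 1 ∧ (c, lo, hi) ∉ sh)) :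
    ((PySem.Set.add hs (c, lo, hi)).map pvPts).sum = (hs.map pvPts).sum ∧
      pvLink sh (PySem.Set.add hs (c, lo, hi)) := by
  by_cases hl : 1 < hi - lo + 1
  · have hmem : (c, lo, hi) ∈ sh := by tauto
    have hpts : pvPts (c, lo, hi) ≠ 0 := by simp only [pvPts]; split_ifs <;> omega
    have : (c, lo, hi) ∈ hs := (link _ hpts).mp hmem
    rw [PySem.Set.add_of_mem this]
    exact ⟨rfl, link⟩
  · have hz : pvPts (c, lo, hi) = 0 := by simp only [pvPts]; split_ifs <;> omega
    constructor
    · rw [PySem.Set.add_eq_ite]; split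
      · rfl
      · simp [hz]
    · intro id hid
      rw [PySem.Set.mem_add]
      constructor
      · intro h; exact Or.inl ((link id hid).mp h)
      · rintro (h | rfl)
        · exact (link id hid).mpr h
        · exact absurd hz hid

theorem pv_take {sh hs : PySem.Set (Int × Int × Int)} {c lo hi : Int}
    (link : pvLink sh hs) (hl : 1 < hi - lo + 1) (hnew : (c, lo, hi) ∉ sh) :
    ((PySem.Set.add hs (c, lo, hi)).map pvPts).sum = (hs.map pvPts).sum + pvPts (c, lo, hi) ∧
      pvLink (PySem.Set.add sh (c, lo, hi)) (PySem.Set.add hs (c, lo, hi)) ∧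
      pvPts (c, lo, hi) = (if hi - lo + 1 = 6 then hi - lo + 1 + 6 else hi - lo + 1) := by
  have hpts : pvPts (c, lo, hi) ≠ 0 := by simp only [pvPts]; split_ifs <;> omega
  have hnew' : (c, lo, hi) ∉ hs := fun h => hnew ((link _ hpts).mpr h)
  refine ⟨?_, ?_, ?_⟩
  · rw [PySem.Set.add_of_not_mem hnew']
    simp
  · intro id hid
    rw [PySem.Set.mem_add, PySem.Set.mem_add]
    constructor
    · rintro (h | rfl)
      · exact Or.inl ((link id hid).mp h)
      · exact Or.inr rfl
    · rintro (h | rfl)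
      · exact Or.inl ((link id hid).mpr h)
      · exact Or.inr rfl
  · simp only [pvPts]
    split_ifs <;> omega

-- main loop invariant: A's running total equals B's set points gained so far
theorem pv_main (bs : List (Int × Int)) :
    ∀ (ps : List (Int × Int)) (t : Int) (sh sv hs vs : PySem.Set (Int × Int × Int)),
    pvLink sh hs → pvLink sv vs →
    (ps.foldl (pvStepA bs) (t, sh, sv)).1
      = t + (((ps.foldl (pvStepW bs) (hs, vs)).1.map pvPts).sum - (hs.map pvPts).sum)
          + (((ps.foldl (pvStepW bs) (hs, vs)).2.map pvPts).sum - (vs.map pvPts).sum) := by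
  intro ps
  induction ps with
  | nil => intro t sh sv hs vs _ _; simp
  | cons p ps ih =>
    intro t sh sv hs vs lh lv
    simp only [List.foldl_cons, pvStepA, pvStepW, pvIdH, pvIdV]
    set mx := pvWalkDn bs (fun x => (x, p.2)) bs.length p.1 with hmx
    set Mx := pvWalkUp bs (fun x => (x, p.2)) bs.length p.1 with hMx
    set my := pvWalkDn bs (fun y => (p.1, y)) bs.length p.2 with hmy
    set My := pvWalkUp bs (fun y => (p.1, y)) bs.length p.2 with hMy
    by_cases ch : 1 < Mx - mx + 1 ∧ (p.2, mx, Mx) ∉ sh <;>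
      by_cases cv : 1 < My - my + 1 ∧ (p.1, my, My) ∉ sv
    · obtain ⟨e1, l1, pe1⟩ := pv_take lh ch.1 ch.2
      obtain ⟨e2, l2, pe2⟩ := pv_take lv cv.1 cv.2
      simp only [if_pos ch, if_pos cv]
      rw [ih _ _ _ _ _ l1 l2, e1, e2]
      rw [← pe1, ← pe2]
      ring
    · obtain ⟨e1, l1, pe1⟩ := pv_take lh ch.1 ch.2
      obtain ⟨e2, l2⟩ := pv_skip lv cv
      simp only [if_pos ch, if_neg cv]
      rw [ih _ _ _ _ _ l1 l2, e1, e2]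
      rw [← pe1]
      ring
    · obtain ⟨e1, l1⟩ := pv_skip lh ch
      obtain ⟨e2, l2, pe2⟩ := pv_take lv cv.1 cv.2
      simp only [if_neg ch, if_pos cv]
      rw [ih _ _ _ _ _ l1 l2, e1, e2]
      rw [← pe2]
      ring
    · obtain ⟨e1, l1⟩ := pv_skip lh ch
      obtain ⟨e2, l2⟩ := pv_skip lv cv
      simp only [if_neg ch, if_neg cv]
      rw [ih _ _ _ _ _ l1 l2, e1, e2]

-- B's lookup step equals the walk step
theorem pv_line_eq (bs : List (Int × Int)) (groups : PySem.Dict Int (PySem.Set Int)) (k0 x : Int)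
    (cell : Int → Int × Int) (hinj : Function.Injective cell)
    (hnd : groups.keys.Nodup) (hv : (groups.getD k0 PySem.Set.empty).Nodup)
    (hS : ∀ t, t ∈ groups.getD k0 PySem.Set.empty ↔ cell t ∈ bs) :
    ((pvRunMap groups).getD (k0, x - 1) (x, x)).1 = pvWalkDn bs cell bs.length x
    ∧ ((pvRunMap groups).getD (k0, x + 1) (x, x)).2 = pvWalkUp bs cell bs.length x := by
  constructor
  · by_cases h : cell (x - 1) ∈ bs
    · obtain ⟨a, b, hr, h1, h2, hget⟩ := (pvRunMap_cases groups k0 (x - 1) hnd hv).2 ((hS _).mpr h)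
      rw [PySem.Dict.getD_of_get?_eq_some _ _ hget]
      have hcov : ∀ t, a ≤ t → t < x → cell t ∈ bs :=
        fun t ht1 ht2 => (hS t).mp (hr.2.1 t ht1 (by omega))
      exact (pvWalkDn_eq bs cell a bs.length x (by omega)
        (pv_card_bound bs cell hinj a x hcov) hcov
        (fun hb => hr.2.2.1 ((hS _).mpr hb))).symm
    · rw [PySem.Dict.getD_of_get?_eq_none _ _
        ((pvRunMap_cases groups k0 (x - 1) hnd hv).1 (fun hm => h ((hS _).mp hm)))]
      rw [pvWalkDn_stop _ _ _ _ h]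
  · by_cases h : cell (x + 1) ∈ bs
    · obtain ⟨a, b, hr, h1, h2, hget⟩ := (pvRunMap_cases groups k0 (x + 1) hnd hv).2 ((hS _).mpr h)
      rw [PySem.Dict.getD_of_get?_eq_some _ _ hget]
      have hcov : ∀ t, x < t → t ≤ b → cell t ∈ bs :=
        fun t ht1 ht2 => (hS t).mp (hr.2.1 t (by omega) ht2)
      have hfuel : (b - x).toNat ≤ bs.length := by
        have := pv_card_bound bs cell hinj (x + 1) (b + 1)
          (fun t ht1 ht2 => hcov t (by omega) (by omega))
        omega
      exact (pvWalkUp_eq bs cell b bs.length x (by omega) hfuel hcov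
        (fun hb => hr.2.2.2 ((hS _).mpr hb))).symm
    · rw [PySem.Dict.getD_of_get?_eq_none _ _
        ((pvRunMap_cases groups k0 (x + 1) hnd hv).1 (fun hm => h ((hS _).mp hm)))]
      rw [pvWalkUp_stop _ _ _ _ h]

theorem pv_rows_nodup_keys (bs : List (Int × Int)) :
    (bs.foldl (fun d p => d.insert p.2 (PySem.Set.add (d.getD p.2 PySem.Set.empty) p.1)) PySem.Dict.empty).keys.Nodup :=
  PySem.Dict.nodup_keys_foldl_insert_key bs (fun q => q.2)
    (fun d q => PySem.Set.add (d.getD q.2 PySem.Set.empty) q.1) PySem.Dict.empty (by simp)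

theorem pv_cols_nodup_keys (bs : List (Int × Int)) :
    (bs.foldl (fun d p => d.insert p.1 (PySem.Set.add (d.getD p.1 PySem.Set.empty) p.2)) PySem.Dict.empty).keys.Nodup :=
  PySem.Dict.nodup_keys_foldl_insert_key bs (fun q => q.1)
    (fun d q => PySem.Set.add (d.getD q.1 PySem.Set.empty) q.2) PySem.Dict.empty (by simp)

theorem pv_rows_mem (bs : List (Int × Int)) (y x : Int) :
    x ∈ (bs.foldl (fun d p => d.insert p.2 (PySem.Set.add (d.getD p.2 PySem.Set.empty) p.1)) PySem.Dict.empty).getD y PySem.Set.empty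
      ↔ (x, y) ∈ bs := by
  rw [pv_group_mem (fun q => q.2) (fun q => q.1) bs PySem.Dict.empty y x]
  constructor
  · rintro (h | ⟨q, hq, h2, h1⟩)
    · simp [PySem.Set.empty] at h
    · have : q = (x, y) := by
        cases q; cases h1; cases h2; rfl
      rw [← this]; exact hq
  · intro h
    exact Or.inr ⟨(x, y), h, rfl, rfl⟩

theorem pv_cols_mem (bs : List (Int × Int)) (y x : Int) :
    x ∈ (bs.foldl (fun d p => d.insert p.1 (PySem.Set.add (d.getD p.1 PySem.Set.empty) p.2)) PySem.Dict.empty).getD y PySem.Set.empty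
      ↔ (y, x) ∈ bs := by
  rw [pv_group_mem (fun q => q.1) (fun q => q.2) bs PySem.Dict.empty y x]
  constructor
  · rintro (h | ⟨q, hq, h2, h1⟩)
    · simp [PySem.Set.empty] at h
    · have : q = (y, x) := by
        cases q; cases h1; cases h2; rfl
      rw [← this]; exact hq
  · intro h
    exact Or.inr ⟨(y, x), h, rfl, rfl⟩

theorem pv_stepB_eq (bs : List (Int × Int)) :
    (fun (s : PySem.Set (Int × Int × Int) × PySem.Set (Int × Int × Int)) (p : Int × Int) =>
      (PySem.Set.add s.1 (p.2, ((pvRunMap (bs.foldl (fun d p => d.insert p.2 (PySem.Set.add (d.getD p.2 PySem.Set.empty) p.1)) PySem.Dict.empty)).getD (p.2, p.1 - 1) (p.1, p.1)).1,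
        ((pvRunMap (bs.foldl (fun d p => d.insert p.2 (PySem.Set.add (d.getD p.2 PySem.Set.empty) p.1)) PySem.Dict.empty)).getD (p.2, p.1 + 1) (p.1, p.1)).2),
       PySem.Set.add s.2 (p.1, ((pvRunMap (bs.foldl (fun d p => d.insert p.1 (PySem.Set.add (d.getD p.1 PySem.Set.empty) p.2)) PySem.Dict.empty)).getD (p.1, p.2 - 1) (p.2, p.2)).1,
        ((pvRunMap (bs.foldl (fun d p => d.insert p.1 (PySem.Set.add (d.getD p.1 PySem.Set.empty) p.2)) PySem.Dict.empty)).getD (p.1, p.2 + 1) (p.2, p.2)).2)))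
    = pvStepW bs := by
  funext s p
  have hrow := pv_line_eq bs
    (bs.foldl (fun d p => d.insert p.2 (PySem.Set.add (d.getD p.2 PySem.Set.empty) p.1)) PySem.Dict.empty)
    p.2 p.1 (fun x => (x, p.2)) (fun a b h => by cases h; rfl)
    (pv_rows_nodup_keys bs)
    (pv_group_nodup (fun q => q.2) (fun q => q.1) bs PySem.Dict.empty (by simp) p.2)
    (fun t => pv_rows_mem bs p.2 t)
  have hcol := pv_line_eq bs
    (bs.foldl (fun d p => d.insert p.1 (PySem.Set.add (d.getD p.1 PySem.Set.empty) p.2)) PySem.Dict.empty)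
    p.1 p.2 (fun y => (p.1, y)) (fun a b h => by cases h; rfl)
    (pv_cols_nodup_keys bs)
    (pv_group_nodup (fun q => q.1) (fun q => q.2) bs PySem.Dict.empty (by simp) p.1)
    (fun t => pv_cols_mem bs p.1 t)
  simp only [pvStepW, pvIdH, pvIdV, hrow.1, hrow.2, hcol.1, hcol.2]

-- ===== VERDICT (by name: the statement is the Claim_ definition above) =====
theorem calculeaza_scor_qwirkle_spec : Claim_equal_calculeaza_scor_qwirkle := by
  intro nps bs _
  show calculeaza_scor_qwirkle nps bs = calculeaza_scor_qwirkle_alt nps bs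
  have halt : calculeaza_scor_qwirkle_alt nps bs
      = ((nps.foldl (pvStepW bs) (PySem.Set.empty, PySem.Set.empty)).1.map pvPts).sum
        + ((nps.foldl (pvStepW bs) (PySem.Set.empty, PySem.Set.empty)).2.map pvPts).sum := by
    rw [← pv_stepB_eq bs]
    rfl
  rw [halt]
  unfold calculeaza_scor_qwirkle
  rw [pv_main bs nps 0 PySem.Set.empty PySem.Set.empty PySem.Set.empty PySem.Set.empty
    (fun _ _ => Iff.rfl) (fun _ _ => Iff.rfl)]
  simp [PySem.Set.empty]
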